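-- pv_equiv track=rewrite | github.com/BBaloglu/ASHURE | src/bilge_pype.py | phred_gap
-- ===== SOURCE A (Python) =====
-- def phred_gap(seq, x):
--     # insert gaps into phred ASCII
--     seq = seq.split('-')
--     s1 = 0
--     s2 = 0
--     out = ''
--     for i in seq:
--         s2+=len(i)
--         out+=x[s1:s2]+'"' # add a space character which evaluates to -1 quality
--         s1=s2
--     return out[:-1]
-- ===== SOURCE B (Python) =====
-- def phred_gap(seq, x):
--     # one pass: emit '"' at each gap, otherwise the next quality char (clipping slice)
--     i = 0
--     parts = []
--     for c in seq:
--         if c == '-':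
--             parts.append('"')
--         else:
--             parts.append(x[i:i+1])
--             i += 1
--     return ''.join(parts)
-- ===== Notes on version B (the rewrite author's own statement) =====
-- stated objective: simpler
-- what changed: Replaced the split-on-'-' plus cumulative-slice-and-strip construction by a single character-by-character pass that keeps one cursor into x and emits '"' per gap, joined at the end.
import Mathlib
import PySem

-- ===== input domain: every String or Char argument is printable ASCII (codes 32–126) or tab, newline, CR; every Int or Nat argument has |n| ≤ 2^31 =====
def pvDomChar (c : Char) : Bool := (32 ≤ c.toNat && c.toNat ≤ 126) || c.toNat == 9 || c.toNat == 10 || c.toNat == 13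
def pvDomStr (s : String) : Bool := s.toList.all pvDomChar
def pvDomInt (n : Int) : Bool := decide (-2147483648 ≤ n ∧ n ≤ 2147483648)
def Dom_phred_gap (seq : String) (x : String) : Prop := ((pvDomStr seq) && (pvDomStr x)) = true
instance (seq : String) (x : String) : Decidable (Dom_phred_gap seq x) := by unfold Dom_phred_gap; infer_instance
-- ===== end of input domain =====

-- B replaces A's split-on-'-'/cumulative-slice/strip-last with one per-character pass and a cursor; objective: simpler.

-- ===== PORT A =====
-- state (s1, s2, out); python ints s1, s2 are nonnegative counters, held as Nat and cast to Int at the slice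
def phred_gap (seq : String) (x : String) : String :=
  let segs := PySem.Chars.splitOn seq.toList ['-']
  let st := segs.foldl
    (fun (st : Nat × Nat × List Char) i =>
      let s2 := st.2.1 + i.length
      (s2, s2, st.2.2 ++ PySem.Chars.slice x.toList (some (st.1 : Int)) (some (s2 : Int)) ++ ['"']))
    (0, 0, [])
  String.ofList (PySem.Chars.slice st.2.2 none (some (-1)))

-- ===== PORT B =====
-- state (i, parts-flattened); cursor i is a nonnegative python int, held as Nat and cast at the slice
def phred_gap_alt (seq : String) (x : String) : String :=
  let st := seq.toList.foldl
    (fun (st : Nat × List Char) c =>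
      if c = '-' then (st.1, st.2 ++ ['"'])
      else (st.1 + 1, st.2 ++ PySem.Chars.slice x.toList (some (st.1 : Int)) (some ((st.1 : Int) + 1))))
    (0, [])
  String.ofList st.2

-- ===== PRECONDITION & SPEC =====
def Spec_phred_gap (seq : String) (x : String) (out : String) : Prop := out = phred_gap_alt seq x
instance (seq : String) (x : String) (out : String) : Decidable (Spec_phred_gap seq x out) := by unfold Spec_phred_gap; infer_instance

-- ===== CLAIM (what is proved, stated in full; the proofs are below) =====
def Claim_equal_phred_gap : Prop := ∀ (seq : String) (x : String), Dom_phred_gap seq x → Spec_phred_gap seq x (phred_gap seq x)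

-- ===== LEMMAS AND PROOFS =====

-- reference splitter on a single-char separator
def pvSpl (d : Char) : List Char → List (List Char)
  | [] => [[]]
  | c :: r => if c = d then [] :: pvSpl d r
              else match pvSpl d r with
                   | [] => [[c]]
                   | h :: t => (c :: h) :: t

theorem pvSpl_ne_nil (d : Char) (l : List Char) : pvSpl d l ≠ [] := by
  cases l with
  | nil => simp [pvSpl]
  | cons c r =>
    simp only [pvSpl]
    split
    · simp
    · split <;> simp

theorem pvGo_eq (d : Char) (l : List Char) : ∀ (fuel : Nat) (cur : List Char) (acc : List (List Char)),
    l.length ≤ fuel →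
    PySem.Chars.splitOn.go [d] fuel l cur acc =
      acc.reverse ++ (match pvSpl d l with
                      | [] => [cur.reverse]
                      | h :: t => (cur.reverse ++ h) :: t) := by
  induction l with
  | nil =>
    intro fuel cur acc _
    cases fuel <;> simp [PySem.Chars.splitOn.go, pvSpl]
  | cons c r ih =>
    intro fuel cur acc hf
    cases fuel with
    | zero => simp at hf
    | succ f =>
      have hf' : r.length ≤ f := by simpa using hf
      by_cases hc : c = d
      · subst hc
        have hpre : List.isPrefixOf [c] (c :: r) = true := by simp [List.isPrefixOf]
        rw [PySem.Chars.splitOn.go, if_pos hpre]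
        simp only [List.length_cons, List.length_nil, List.drop_succ_cons, List.drop_zero]
        rw [ih f [] (cur.reverse :: acc) hf']
        rcases hS : pvSpl c r with _ | ⟨h, t⟩
        · exact absurd hS (pvSpl_ne_nil c r)
        · simp [pvSpl, hS]
      · have hpre : List.isPrefixOf [d] (c :: r) = false := by
          simp [List.isPrefixOf]; exact fun h => absurd h.symm hc
        rw [PySem.Chars.splitOn.go, if_neg (by simp [hpre])]
        rw [ih f (c :: cur) acc hf']
        rcases hS : pvSpl d r with _ | ⟨h, t⟩
        · exact absurd hS (pvSpl_ne_nil d r)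
        · simp [pvSpl, hc, hS]

theorem pvSplitOn_eq (d : Char) (l : List Char) :
    PySem.Chars.splitOn l [d] = pvSpl d l := by
  rw [PySem.Chars.splitOn, pvGo_eq d l (l.length + 1) [] [] (by omega)]
  rcases hS : pvSpl d l with _ | ⟨h, t⟩
  · exact absurd hS (pvSpl_ne_nil d l)
  · simp

-- B's output, directly by recursion on the characters
def pvOutB (x : List Char) : List Char → Nat → List Char
  | [], _ => []
  | c :: r, n =>
      if c = '-' then '"' :: pvOutB x r n
      else (x.drop n).take 1 ++ pvOutB x r (n + 1)

-- A's output (before the final strip), by recursion on segments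
def pvG (x : List Char) : List (List Char) → Nat → List Char
  | [], _ => []
  | i :: rest, n => (x.drop n).take i.length ++ ['"'] ++ pvG x rest (n + i.length)

-- the two slice shapes the ports use, as drop/take
theorem pvSliceSeg (x : List Char) (n k : Nat) :
    PySem.Chars.slice x (some (n : Int)) (some ((n + k : Nat) : Int)) = (x.drop n).take k := by
  rw [PySem.Chars.slice_eq_listSlice, PySem.List.slice_natCast]
  congr 1
  omega

theorem pvSliceOne (x : List Char) (n : Nat) :
    PySem.Chars.slice x (some (n : Int)) (some ((n : Int) + 1)) = (x.drop n).take 1 := by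
  rw [show ((n : Int) + 1) = ((n + 1 : Nat) : Int) by push_cast; ring]
  simpa using pvSliceSeg x n 1

theorem pvFoldA (x : List Char) (segs : List (List Char)) :
    ∀ (n : Nat) (out : List Char),
    (segs.foldl
      (fun (st : Nat × Nat × List Char) i =>
        (st.2.1 + i.length, st.2.1 + i.length,
          st.2.2 ++ PySem.Chars.slice x (some (st.1 : Int)) (some ((st.2.1 + i.length : Nat) : Int)) ++ ['"']))
      (n, n, out)).2.2 = out ++ pvG x segs n := by
  induction segs with
  | nil => intro n out; simp [pvG]
  | cons i rest ih =>
    intro n out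
    simp only [List.foldl_cons]
    rw [ih (n + i.length), pvSliceSeg]
    simp [pvG]

theorem pvFoldB (x : List Char) (l : List Char) :
    ∀ (n : Nat) (out : List Char),
    (l.foldl
      (fun (st : Nat × List Char) c =>
        if c = '-' then (st.1, st.2 ++ ['"'])
        else (st.1 + 1, st.2 ++ PySem.Chars.slice x (some (st.1 : Int)) (some ((st.1 : Int) + 1))))
      (n, out)).2 = out ++ pvOutB x l n := by
  induction l with
  | nil => intro n out; simp [pvOutB]
  | cons c r ih =>
    intro n out
    simp only [List.foldl_cons]
    by_cases hc : c = '-'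
    · rw [if_pos hc, ih n]
      simp [pvOutB, hc]
    · rw [if_neg hc, ih (n + 1), pvSliceOne]
      simp [pvOutB, hc]

theorem pvG_spl (x : List Char) (l : List Char) :
    ∀ (n : Nat), pvG x (pvSpl '-' l) n = pvOutB x l n ++ ['"'] := by
  induction l with
  | nil => intro n; simp [pvSpl, pvG, pvOutB]
  | cons c r ih =>
    intro n
    by_cases hc : c = '-'
    · subst hc
      simp [pvSpl, pvG, pvOutB, ih]
    · simp only [pvSpl, pvOutB, if_neg hc]
      rcases hS : pvSpl '-' r with _ | ⟨h, t⟩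
      · exact absurd hS (pvSpl_ne_nil '-' r)
      · have ihs := ih (n + 1)
        rw [hS] at ihs
        simp only [pvG] at ihs
        have hsplit : (x.drop n).take (h.length + 1)
            = (x.drop n).take 1 ++ (x.drop (n + 1)).take h.length := by
          rw [show h.length + 1 = 1 + h.length by omega, List.take_add, List.drop_drop]
        simp only [pvG, List.length_cons]
        rw [show n + (h.length + 1) = (n + 1) + h.length by omega, hsplit]
        simp [ihs]

-- ===== VERDICT (by name: the statement is the Claim_ definition above) =====
theorem phred_gap_spec : Claim_equal_phred_gap := by
  intro seq x _
  show phred_gap seq x = phred_gap_alt seq x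
  simp only [phred_gap, phred_gap_alt, pvSplitOn_eq]
  rw [pvFoldA, pvFoldB, pvG_spl]
  simp [PySem.Chars.slice_eq_listSlice, PySem.List.slice_to_neg_one]
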